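-- pv_equiv track=rewrite | github.com/gmao-ckung/advent_of_code | 2020/day18.py | find_plus_paranthesis
-- ===== SOURCE A (Python) =====
-- def find_plus_paranthesis(curr_position, expression, pal_list):
--     while(curr_position < len(expression)):
--         if expression[curr_position] == '(':
--             L_P_position = curr_position
--             curr_position += 1
--             pal_list, curr_position = find_plus_paranthesis(curr_position,expression,pal_list)
--         elif expression[curr_position] == ')':
--             curr_position += 1
--             return pal_list, curr_position
--         elif expression[curr_position] == '+':
--             curr_position += 1
--             if expression[curr_position] != '(':
--                 pal_list.append(L_P_position)
--                 pal_list.append(curr_position)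
--                 curr_position += 1
--             else:
--                 curr_position += 1
--                 pal_list.append(L_P_position)
--                 p_result, curr_position = find_plus_paranthesis(curr_position,expression,pal_list)
--                 pal_list.append(curr_position-1)
--         elif expression[curr_position] == '-':
--             curr_position += 1
--             if expression[curr_position] != '(':
--                 L_P_position = curr_position
--                 curr_position += 1
--             else:
--                 L_P_position = curr_position
--                 curr_position += 1
--                 pal_list, curr_position = find_plus_paranthesis(curr_position,expression,pal_list)
--         elif expression[curr_position] == "*":
--             curr_position += 1
--             if expression[curr_position] != '(':
--                 L_P_position = curr_position
--                 curr_position += 1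
--             else:
--                 L_P_position = curr_position
--                 curr_position += 1
--                 pal_list, curr_position = find_plus_paranthesis(curr_position,expression,pal_list)
--         else:
--             L_P_position = curr_position
--             curr_position += 1
--
--     return pal_list, curr_position
-- ===== SOURCE B (Python) =====
-- def find_plus_paranthesis(curr_position, expression, pal_list):
--     # Two-phase re-implementation: first tokenize the scan (one token per step of the
--     # original, operators consume two characters), stopping at an unmatched ')';
--     # then interpret the token stream with an explicit frame stack.
--     # Mutates and returns the caller's pal_list, like the original.
--     n = len(expression)
--     tokens = []
--     i = curr_position
--     depth = 0
--     while i < n: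
--         c = expression[i]
--         if c == '(':
--             tokens.append(('open', i)); depth += 1; i += 1
--         elif c == ')':
--             tokens.append(('close', i)); i += 1
--             if depth == 0:
--                 break
--             depth -= 1
--         elif c == '+' or c == '-' or c == '*':
--             kind = 'plus' if c == '+' else 'op'
--             if expression[i + 1] == '(':
--                 tokens.append((kind + '(', i)); depth += 1
--             else:
--                 tokens.append((kind, i))
--             i += 2
--         else:
--             tokens.append(('atom', i)); i += 1
--     pos = curr_position
--     lp = None  # this frame's L_P_position (None = not yet set)
--     stack = []  # open frames: (L_P to restore on ')', frame opened by '+(')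
--     for kind, p in tokens:
--         if kind == 'open':
--             stack.append((p, False)); lp = None; pos = p + 1
--         elif kind == 'close':
--             pos = p + 1
--             if not stack:
--                 return pal_list, pos
--             saved, is_plus = stack.pop()
--             if is_plus:
--                 pal_list.append(p)
--             lp = saved
--         elif kind == 'plus':
--             pal_list.append(lp); pal_list.append(p + 1); pos = p + 2
--         elif kind == 'plus(':
--             pal_list.append(lp); stack.append((lp, True)); lp = None; pos = p + 2
--         elif kind == 'op':
--             lp = p + 1; pos = p + 2
--         elif kind == 'op(':
--             stack.append((p + 1, False)); lp = None; pos = p + 2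
--         else:  # 'atom'
--             lp = p; pos = p + 1
--     while stack:
--         saved, is_plus = stack.pop()
--         if is_plus:
--             pal_list.append(pos - 1)
--     return pal_list, pos
-- ===== Notes on version B (the rewrite author's own statement) =====
-- stated objective: alternative
-- what changed: Replaces the one-recursive-call-per-parenthesised-subexpression scan with a two-phase pipeline: a tokenizer that turns the scan into a token list (stopping after an unmatched ')'), then a fold over the tokens with an explicit frame stack that performs the appends and unwinds open frames at the end.
import Mathlib
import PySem

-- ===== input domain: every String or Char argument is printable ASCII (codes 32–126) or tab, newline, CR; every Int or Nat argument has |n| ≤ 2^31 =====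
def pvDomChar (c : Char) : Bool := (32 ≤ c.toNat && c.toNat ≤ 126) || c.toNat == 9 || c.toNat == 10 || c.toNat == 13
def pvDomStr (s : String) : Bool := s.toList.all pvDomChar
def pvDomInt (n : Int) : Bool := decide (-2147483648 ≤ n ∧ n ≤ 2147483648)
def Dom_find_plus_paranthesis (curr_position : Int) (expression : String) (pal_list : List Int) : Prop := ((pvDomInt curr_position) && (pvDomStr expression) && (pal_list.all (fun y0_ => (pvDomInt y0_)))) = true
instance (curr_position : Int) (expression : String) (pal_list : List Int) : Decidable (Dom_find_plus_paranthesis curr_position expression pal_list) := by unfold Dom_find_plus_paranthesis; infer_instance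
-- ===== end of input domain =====

-- B replaces A's one-recursive-call-per-parenthesis scan by a two-phase tokenize-then-interpret
-- pass (a token list, then a fold over it with an explicit frame stack) — an alternative
-- decomposition, same O(n) cost; both mutate/return the caller's pal_list in Python, so the
-- equivalence proved here is about the return value.


-- ===== PORT A =====
-- Literal port of A's while-loop + recursion.  One recursive frame per call, state
-- (position i, pal list, this frame's L_P_position as an Option — Python leaves it unset).
-- Totalization choices (all outside Pre_, where Python A raises):
--  * expression[i] out of range (IndexError) is read as the neutral char ' ' via getD
--    (for i < len that only happens at i < -len),
--  * an unset L_P_position (UnboundLocalError) is read as 0 via Option.getD,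
--  * fuel (len - i).toNat + 1 bounds the scan; each step advances i by ≥ 1 so the
--    fuel-exhausted case is never reached when the initial fuel is used (proved below).
-- The recursive result pair is written through its projections .1/.2 instead of a let-pair.
def goA (ch : List Char) : Nat → Int → List Int → Option Int → List Int × Int
  | 0, i, pal, _ => (pal, i)
  | f+1, i, pal, lp =>
    if i < (ch.length : Int) then
      if (PySem.List.pyGet? ch i).getD ' ' = '(' then
        -- L_P_position = i; recurse after '('; continue the while loop in this frame
        goA ch f (goA ch f (i+1) pal none).2 (goA ch f (i+1) pal none).1 (some i)
      else if (PySem.List.pyGet? ch i).getD ' ' = ')' then (pal, i+1)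
      else if (PySem.List.pyGet? ch i).getD ' ' = '+' then
        if (PySem.List.pyGet? ch (i+1)).getD ' ' = '(' then
          goA ch f (goA ch f (i+2) (pal ++ [lp.getD 0]) none).2
                   ((goA ch f (i+2) (pal ++ [lp.getD 0]) none).1
                     ++ [(goA ch f (i+2) (pal ++ [lp.getD 0]) none).2 - 1]) lp
        else goA ch f (i+2) (pal ++ [lp.getD 0, i+1]) lp
      else if (PySem.List.pyGet? ch i).getD ' ' = '-' ∨ (PySem.List.pyGet? ch i).getD ' ' = '*' then
        if (PySem.List.pyGet? ch (i+1)).getD ' ' = '(' then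
          goA ch f (goA ch f (i+2) pal none).2 (goA ch f (i+2) pal none).1 (some (i+1))
        else goA ch f (i+2) pal (some (i+1))
      else goA ch f (i+1) pal (some i)
    else (pal, i)

def find_plus_paranthesis (curr_position : Int) (expression : String) (pal_list : List Int) : List Int × Int :=
  goA expression.toList (((expression.toList.length : Int) - curr_position).toNat + 1)
      curr_position pal_list none

-- ===== PORT B =====
-- Port of Source B: phase 1 turns the scan into a token list (one token per loop step of Source B's
-- tokenizer; operator tokens consume two characters; the tokenizer tracks the paren depth
-- and stops right after an unmatched ')'); phase 2 folds over the token list with an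
-- explicit frame stack, then unwinds the still-open frames.
-- Same out-of-range/unset-L_P totalization choices as in port A (all outside Pre_);
-- the tokenizer carries the same fuel bound as Source B's `while i < n` scan carries implicitly.
inductive PvTok where
  | topen (p : Int)      -- '('
  | tclose (p : Int)     -- ')'
  | tplus (p : Int)      -- '+' followed by a non-'(' operand
  | tplusOpen (p : Int)  -- '+('
  | top (p : Int)        -- '-' or '*' followed by a non-'(' operand
  | topOpen (p : Int)    -- '-(' or '*('
  | tatom (p : Int)      -- any other character
deriving DecidableEq, Repr

def pvTokenize (ch : List Char) : Nat → Nat → Int → List PvTok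
  | 0, _, _ => []
  | f+1, d, i =>
    if i < (ch.length : Int) then
      if (PySem.List.pyGet? ch i).getD ' ' = '(' then
        PvTok.topen i :: pvTokenize ch f (d+1) (i+1)
      else if (PySem.List.pyGet? ch i).getD ' ' = ')' then
        if d = 0 then [PvTok.tclose i] else PvTok.tclose i :: pvTokenize ch f (d-1) (i+1)
      else if (PySem.List.pyGet? ch i).getD ' ' = '+' then
        if (PySem.List.pyGet? ch (i+1)).getD ' ' = '(' then
          PvTok.tplusOpen i :: pvTokenize ch f (d+1) (i+2)
        else PvTok.tplus i :: pvTokenize ch f d (i+2)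
      else if (PySem.List.pyGet? ch i).getD ' ' = '-' ∨ (PySem.List.pyGet? ch i).getD ' ' = '*' then
        if (PySem.List.pyGet? ch (i+1)).getD ' ' = '(' then
          PvTok.topOpen i :: pvTokenize ch f (d+1) (i+2)
        else PvTok.top i :: pvTokenize ch f d (i+2)
      else PvTok.tatom i :: pvTokenize ch f d (i+1)
    else []

-- Source B's trailing `while stack:` unwinding loop
def unwindB (stack : List (Option Int × Bool)) (pal : List Int) (i : Int) : List Int × Int :=
  match stack with
  | [] => (pal, i)
  | (_, isPlus) :: rest => unwindB rest (if isPlus then pal ++ [i - 1] else pal) i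

-- Source B's `for kind, p in tokens:` interpreter; state = (pal, lp, stack, pos)
def pvRunToks : List PvTok → List Int → Option Int → List (Option Int × Bool) → Int → List Int × Int
  | [], pal, _, stack, pos => unwindB stack pal pos
  | t :: ts, pal, lp, stack, _ =>
    match t with
    | PvTok.topen p => pvRunToks ts pal none ((some p, false) :: stack) (p+1)
    | PvTok.tclose p =>
        match stack with
        | [] => (pal, p+1)
        | (saved, isPlus) :: rest =>
            pvRunToks ts (if isPlus then pal ++ [p] else pal) saved rest (p+1)
    | PvTok.tplus p => pvRunToks ts (pal ++ [lp.getD 0, p+1]) lp stack (p+2)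
    | PvTok.tplusOpen p => pvRunToks ts (pal ++ [lp.getD 0]) none ((lp, true) :: stack) (p+2)
    | PvTok.top p => pvRunToks ts pal (some (p+1)) stack (p+2)
    | PvTok.topOpen p => pvRunToks ts pal none ((some (p+1), false) :: stack) (p+2)
    | PvTok.tatom p => pvRunToks ts pal (some p) stack (p+1)

def find_plus_paranthesis_alt (curr_position : Int) (expression : String) (pal_list : List Int) : List Int × Int :=
  pvRunToks (pvTokenize expression.toList (((expression.toList.length : Int) - curr_position).toNat + 1) 0 curr_position)
    pal_list none [] curr_position

-- ===== PRECONDITION & SPEC =====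
-- Pre_ excludes exactly the inputs on which Python A raises: IndexError (start below -len,
-- or a scanned '+'/'-'/'*' as the last character) and UnboundLocalError (a scanned '+' as the
-- first character of a frame).  pvScanOK is a small grammar automaton over the characters
-- (state: at-frame-start flag and open-frame depth), not a copy of either port.
def pvScanOK : Bool → Nat → List Char → Bool
  | _, _, [] => true
  | atStart, d, c :: rest =>
    if c = '+' then
      if atStart then false
      else match rest with
        | [] => false
        | c2 :: r2 => if c2 = '(' then pvScanOK true (d+1) r2 else pvScanOK false d r2
    else if c = '-' ∨ c = '*' then
      match rest with
      | [] => false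
      | c2 :: r2 => if c2 = '(' then pvScanOK true (d+1) r2 else pvScanOK false d r2
    else if c = '(' then pvScanOK true (d+1) rest
    else if c = ')' then (if d = 0 then true else pvScanOK false (d-1) rest)
    else pvScanOK false d rest

-- the characters A actually visits from a start position s (negative s wraps, Python-style)
def pvEffChars (curr : Int) (ch : List Char) : List Char :=
  if curr < 0 then ch.drop ((ch.length : Int) + curr).toNat ++ ch else ch.drop curr.toNat

def Pre_find_plus_paranthesis (curr_position : Int) (expression : String) (pal_list : List Int) : Prop :=
  ((expression.toList.length : Int) ≤ curr_position) ∨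
  (-(expression.toList.length : Int) ≤ curr_position ∧ curr_position < (expression.toList.length : Int) ∧
    pvScanOK true 0 (pvEffChars curr_position expression.toList) = true)

instance (curr_position : Int) (expression : String) (pal_list : List Int) : Decidable (Pre_find_plus_paranthesis curr_position expression pal_list) := by
  unfold Pre_find_plus_paranthesis; infer_instance

def pvWitness_find_plus_paranthesis : Int × String × List Int := (0, "1+2", [])

def Spec_find_plus_paranthesis (curr_position : Int) (expression : String) (pal_list : List Int) (out : List Int × Int) : Prop := out = find_plus_paranthesis_alt curr_position expression pal_list
instance (curr_position : Int) (expression : String) (pal_list : List Int) (out : List Int × Int) : Decidable (Spec_find_plus_paranthesis curr_position expression pal_list out) := by unfold Spec_find_plus_paranthesis; infer_instance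

-- ===== CLAIM (what is proved, stated in full; the proofs are below) =====
def Claim_equal_find_plus_paranthesis : Prop := ∀ (curr_position : Int) (expression : String) (pal_list : List Int), Dom_find_plus_paranthesis curr_position expression pal_list → Pre_find_plus_paranthesis curr_position expression pal_list → Spec_find_plus_paranthesis curr_position expression pal_list (find_plus_paranthesis curr_position expression pal_list)

-- ===== LEMMAS AND PROOFS =====

-- proof-only intermediate machine: the fused single-pass stack scanner; pv_fuse below shows
-- B's tokenize-then-interpret pipeline equals it, pv_main relates it to A's recursive scan
def goB (ch : List Char) : Nat → Int → List Int → Option Int → List (Option Int × Bool) → List Int × Int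
  | 0, i, pal, _, stack => unwindB stack pal i
  | f+1, i, pal, lp, stack =>
    if i < (ch.length : Int) then
      if (PySem.List.pyGet? ch i).getD ' ' = '(' then
        goB ch f (i+1) pal none ((some i, false) :: stack)
      else if (PySem.List.pyGet? ch i).getD ' ' = ')' then
        match stack with
        | [] => (pal, i+1)
        | (saved, isPlus) :: rest =>
            goB ch f (i+1) (if isPlus then pal ++ [i] else pal) saved rest
      else if (PySem.List.pyGet? ch i).getD ' ' = '+' then
        if (PySem.List.pyGet? ch (i+1)).getD ' ' = '(' then
          goB ch f (i+2) (pal ++ [lp.getD 0]) none ((lp, true) :: stack)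
        else goB ch f (i+2) (pal ++ [lp.getD 0, i+1]) lp stack
      else if (PySem.List.pyGet? ch i).getD ' ' = '-' ∨ (PySem.List.pyGet? ch i).getD ' ' = '*' then
        if (PySem.List.pyGet? ch (i+1)).getD ' ' = '(' then
          goB ch f (i+2) pal none ((some (i+1), false) :: stack)
        else goB ch f (i+2) pal (some (i+1)) stack
      else goB ch f (i+1) pal (some i) stack
    else unwindB stack pal i

-- B's pipeline equals the fused scanner (induction on the shared fuel; the tokenizer's
-- depth counter equals the interpreter's stack height)
theorem pv_fuse (ch : List Char) : ∀ (f : Nat) (d : Nat) (i : Int) (pal : List Int)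
    (lp : Option Int) (stack : List (Option Int × Bool)), stack.length = d →
    pvRunToks (pvTokenize ch f d i) pal lp stack i = goB ch f i pal lp stack := by
  intro f
  induction f with
  | zero => intro d i pal lp stack _; rfl
  | succ f ih =>
    intro d i pal lp stack hd
    by_cases hi : i < (ch.length : Int)
    · simp only [pvTokenize, goB, hi, if_true]
      by_cases h1 : (PySem.List.pyGet? ch i).getD ' ' = '('
      · simp only [h1, if_true, pvRunToks]
        exact ih (d+1) (i+1) pal none ((some i, false) :: stack) (by simp [← hd])
      · simp only [h1, if_false]
        by_cases h2 : (PySem.List.pyGet? ch i).getD ' ' = ')'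
        · simp only [h2, if_true]
          cases stack with
          | nil =>
            have hd0 : d = 0 := by simpa using hd.symm
            simp [hd0, pvRunToks]
          | cons e rest =>
            obtain ⟨saved, isPlus⟩ := e
            have hdn : d ≠ 0 := by simp [← hd]
            rw [if_neg hdn]
            simp only [pvRunToks]
            exact ih (d-1) (i+1) (if isPlus then pal ++ [i] else pal) saved rest (by simp [← hd])
        · simp only [h2, if_false]
          by_cases h3 : (PySem.List.pyGet? ch i).getD ' ' = '+'
          · simp only [h3, if_true]
            by_cases h4 : (PySem.List.pyGet? ch (i+1)).getD ' ' = '('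
            · simp only [h4, if_true, pvRunToks]
              exact ih (d+1) (i+2) (pal ++ [lp.getD 0]) none ((lp, true) :: stack) (by simp [← hd])
            · simp only [h4, if_false, pvRunToks]
              exact ih d (i+2) (pal ++ [lp.getD 0, i+1]) lp stack hd
          · simp only [h3, if_false]
            by_cases h5 : (PySem.List.pyGet? ch i).getD ' ' = '-' ∨
                (PySem.List.pyGet? ch i).getD ' ' = '*'
            · simp only [h5, if_true]
              by_cases h6 : (PySem.List.pyGet? ch (i+1)).getD ' ' = '('
              · simp only [h6, if_true, pvRunToks]
                exact ih (d+1) (i+2) pal none ((some (i+1), false) :: stack) (by simp [← hd])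
              · simp only [h6, if_false, pvRunToks]
                exact ih d (i+2) pal (some (i+1)) stack hd
            · simp only [h5, if_false, pvRunToks]
              exact ih d (i+1) pal (some i) stack hd
    · simp [pvTokenize, goB, hi, pvRunToks]

-- goA never moves the position backwards
theorem pv_posA (ch : List Char) : ∀ (f : Nat) (i : Int) (pal : List Int) (lp : Option Int),
    i ≤ (goA ch f i pal lp).2 := by
  intro f
  induction f with
  | zero => intro i pal lp; simp [goA]
  | succ f ih =>
    intro i pal lp
    simp only [goA]
    split_ifs with hi h1 h2 h3 h4 h5 h6
    · have a1 := ih (i+1) pal none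
      have a2 := ih (goA ch f (i+1) pal none).2 (goA ch f (i+1) pal none).1 (some i)
      omega
    · omega
    · have a1 := ih (i+2) (pal ++ [lp.getD 0]) none
      have a2 := ih (goA ch f (i+2) (pal ++ [lp.getD 0]) none).2
        ((goA ch f (i+2) (pal ++ [lp.getD 0]) none).1
          ++ [(goA ch f (i+2) (pal ++ [lp.getD 0]) none).2 - 1]) lp
      omega
    · have a1 := ih (i+2) (pal ++ [lp.getD 0, i+1]) lp
      omega
    · have a1 := ih (i+2) pal none
      have a2 := ih (goA ch f (i+2) pal none).2 (goA ch f (i+2) pal none).1 (some (i+1))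
      omega
    · have a1 := ih (i+2) pal (some (i+1))
      omega
    · have a1 := ih (i+1) pal (some i)
      omega
    · omega

-- with sufficient fuel the result of goA does not depend on the fuel
theorem pv_monoA (ch : List Char) : ∀ (f g : Nat) (i : Int) (pal : List Int) (lp : Option Int),
    ((ch.length : Int) - i).toNat < f → ((ch.length : Int) - i).toNat < g →
    goA ch f i pal lp = goA ch g i pal lp := by
  intro f
  induction f with
  | zero => intro g i pal lp hf; omega
  | succ f ih =>
    intro g i pal lp hf hg
    cases g with
    | zero => omega
    | succ g =>
      simp only [goA]
      by_cases hi : i < (ch.length : Int)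
      · simp only [hi, if_true]
        split_ifs with h1 h2 h3 h4 h5 h6 <;> try rfl
        · have hc : goA ch f (i+1) pal none = goA ch g (i+1) pal none :=
            ih g (i+1) pal none (by omega) (by omega)
          rw [hc]
          have hp := pv_posA ch g (i+1) pal none
          exact ih g _ _ (some i) (by omega) (by omega)
        · have hc : goA ch f (i+2) (pal ++ [lp.getD 0]) none
              = goA ch g (i+2) (pal ++ [lp.getD 0]) none :=
            ih g (i+2) _ none (by omega) (by omega)
          rw [hc]
          have hp := pv_posA ch g (i+2) (pal ++ [lp.getD 0]) none
          exact ih g _ _ lp (by omega) (by omega)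
        · exact ih g (i+2) _ lp (by omega) (by omega)
        · have hc : goA ch f (i+2) pal none = goA ch g (i+2) pal none :=
            ih g (i+2) pal none (by omega) (by omega)
          rw [hc]
          have hp := pv_posA ch g (i+2) pal none
          exact ih g _ _ (some (i+1)) (by omega) (by omega)
        · exact ih g (i+2) pal (some (i+1)) (by omega) (by omega)
        · exact ih g (i+1) pal (some i) (by omega) (by omega)
      · simp [hi]

-- the stack machine's pending frames, expressed through goA: pop one frame, run the
-- parent's remaining loop with canonical fuel, repeat
def pvUnwindK (ch : List Char) : List (Option Int × Bool) → List Int × Int → List Int × Int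
  | [], s => s
  | (saved, isPlus) :: rest, s =>
      pvUnwindK ch rest
        (goA ch (((ch.length : Int) - s.2).toNat + 1) s.2
          (if isPlus then s.1 ++ [s.2 - 1] else s.1) saved)

theorem pv_goA_stop (ch : List Char) (f : Nat) (i : Int) (pal : List Int) (lp : Option Int)
    (h : (ch.length : Int) ≤ i) : goA ch f i pal lp = (pal, i) := by
  cases f with
  | zero => rfl
  | succ f => simp [goA, not_lt.2 h]

theorem pv_unwindK_stop (ch : List Char) : ∀ (stack : List (Option Int × Bool)) (pal : List Int)
    (i : Int), (ch.length : Int) ≤ i → pvUnwindK ch stack (pal, i) = unwindB stack pal i := by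
  intro stack
  induction stack with
  | nil => intro pal i _; rfl
  | cons e rest ih =>
    intro pal i h
    obtain ⟨saved, isPlus⟩ := e
    simp only [pvUnwindK, unwindB, pv_goA_stop ch _ i _ saved h]
    exact ih _ i h

-- main invariant: the fused stack machine equals the recursive scan followed by the
-- unwinding of the pending frames
theorem pv_main (ch : List Char) : ∀ (f : Nat) (i : Int) (pal : List Int) (lp : Option Int)
    (stack : List (Option Int × Bool)), ((ch.length : Int) - i).toNat < f →
    goB ch f i pal lp stack = pvUnwindK ch stack (goA ch f i pal lp) := by
  intro f
  induction f with
  | zero => intro i pal lp stack hf; omega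
  | succ f ih =>
    intro i pal lp stack hf
    by_cases hi : i < (ch.length : Int)
    · simp only [goA, goB, hi, if_true]
      by_cases h1 : (PySem.List.pyGet? ch i).getD ' ' = '('
      · simp only [h1, if_true]
        rw [ih (i+1) pal none ((some i, false) :: stack) (by omega)]
        simp only [pvUnwindK, if_neg Bool.false_ne_true]
        have hp := pv_posA ch f (i+1) pal none
        exact congrArg (pvUnwindK ch stack) (pv_monoA ch _ f _ _ (some i) (by omega) (by omega))
      · simp only [h1, if_false]
        by_cases h2 : (PySem.List.pyGet? ch i).getD ' ' = ')'
        · simp only [h2, if_true]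
          cases stack with
          | nil => rfl
          | cons e rest =>
            obtain ⟨saved, isPlus⟩ := e
            simp only []
            rw [ih (i+1) (if isPlus then pal ++ [i] else pal) saved rest (by omega)]
            simp only [pvUnwindK]
            have he : (i + 1 : Int) - 1 = i := by omega
            rw [he]
            exact congrArg (pvUnwindK ch rest) (pv_monoA ch f _ _ _ saved (by omega) (by omega))
        · simp only [h2, if_false]
          by_cases h3 : (PySem.List.pyGet? ch i).getD ' ' = '+'
          · simp only [h3, if_true]
            by_cases h4 : (PySem.List.pyGet? ch (i+1)).getD ' ' = '('
            · simp only [h4, if_true]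
              rw [ih (i+2) (pal ++ [lp.getD 0]) none ((lp, true) :: stack) (by omega)]
              simp only [pvUnwindK, if_true]
              have hp := pv_posA ch f (i+2) (pal ++ [lp.getD 0]) none
              exact congrArg (pvUnwindK ch stack) (pv_monoA ch _ f _ _ lp (by omega) (by omega))
            · simp only [h4, if_false]
              exact ih (i+2) (pal ++ [lp.getD 0, i+1]) lp stack (by omega)
          · simp only [h3, if_false]
            by_cases h5 : (PySem.List.pyGet? ch i).getD ' ' = '-' ∨
                (PySem.List.pyGet? ch i).getD ' ' = '*'
            · simp only [h5, if_true]
              by_cases h6 : (PySem.List.pyGet? ch (i+1)).getD ' ' = '('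
              · simp only [h6, if_true]
                rw [ih (i+2) pal none ((some (i+1), false) :: stack) (by omega)]
                simp only [pvUnwindK, if_neg Bool.false_ne_true]
                have hp := pv_posA ch f (i+2) pal none
                exact congrArg (pvUnwindK ch stack)
                  (pv_monoA ch _ f _ _ (some (i+1)) (by omega) (by omega))
              · simp only [h6, if_false]
                exact ih (i+2) pal (some (i+1)) stack (by omega)
            · simp only [h5, if_false]
              exact ih (i+1) pal (some i) stack (by omega)
    · simp only [goA, goB, hi, if_false]
      exact (pv_unwindK_stop ch stack pal i (by omega)).symm

-- ===== VERDICT (by name: the statement is the Claim_ definition above) =====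
theorem find_plus_paranthesis_spec : Claim_equal_find_plus_paranthesis := by
  intro curr_position expression pal_list _ _
  unfold Spec_find_plus_paranthesis find_plus_paranthesis find_plus_paranthesis_alt
  rw [pv_fuse expression.toList _ 0 curr_position pal_list none [] rfl]
  rw [pv_main expression.toList _ curr_position pal_list none [] (by omega)]
  rfl
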